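-- pv_equiv track=rewrite | github.com/hissue/Program-Solution | 프로그래머스/unrated/181890. 왼쪽 오른쪽/왼쪽 오른쪽.py | solution
-- ===== SOURCE A (Python) =====
-- def solution(str_list):
--     if  "l" not in str_list and "r" not in str_list:
--         return []
--     for idx,data in enumerate(str_list):
--         if data == "l":
--             return str_list[:idx]
--         elif data == "r":
--             return str_list[idx+1:]
--         else:
--             continue
-- ===== SOURCE B (Python) =====
-- def solution(str_list):
--     out = []
--     it = iter(str_list)
--     for x in it:
--         if x == "l":
--             return out
--         if x == "r":
--             return list(it)
--         out.append(x)
--     return []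
-- ===== Notes on version B (the rewrite author's own statement) =====
-- stated objective: alternative
-- what changed: Replaces A's membership pre-check plus enumerate-and-slice loop with a single guard-free pass that accumulates the prefix element by element and, on 'r', returns the remainder by exhausting the iterator; no indices, no slicing, and the empty list by loop fall-through instead of a pre-scan guard.
import Mathlib
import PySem

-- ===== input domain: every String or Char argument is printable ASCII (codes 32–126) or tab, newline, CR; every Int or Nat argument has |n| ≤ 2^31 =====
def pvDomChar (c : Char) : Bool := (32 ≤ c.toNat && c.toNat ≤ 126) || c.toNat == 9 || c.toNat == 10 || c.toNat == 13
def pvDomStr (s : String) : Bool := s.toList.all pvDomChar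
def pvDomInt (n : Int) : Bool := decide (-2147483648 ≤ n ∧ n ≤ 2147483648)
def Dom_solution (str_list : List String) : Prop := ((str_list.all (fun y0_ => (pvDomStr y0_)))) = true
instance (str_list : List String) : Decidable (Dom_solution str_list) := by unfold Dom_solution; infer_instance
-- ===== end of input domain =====

-- B replaces A's membership guard + enumerate-and-slice loop with a single
-- guard-free pass that accumulates the prefix and returns the iterator's
-- remainder on 'r' (objective: alternative decomposition; same O(n) cost).


-- ===== PORT A =====
-- the `for idx, data in enumerate(str_list)` loop; `orig` is the whole list the
-- slices are taken from.  The nil case is Python's fall-through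
-- return of None, unreachable under the membership guard in `solution`.
def solLoopA (orig : List String) : List String → Nat → List String
  | [], _ => []
  | d :: t, idx =>
    if d = "l" then PySem.List.slice orig none (some (idx : Int))
    else if d = "r" then PySem.List.slice orig (some ((idx : Int) + 1)) none
    else solLoopA orig t (idx + 1)

def solution (str_list : List String) : List String :=
  if ¬ str_list.contains "l" ∧ ¬ str_list.contains "r" then []
  else solLoopA str_list str_list 0

-- ===== PORT B =====
-- B's `for x in it:` loop with accumulator `out`; on 'r' the iterator's
-- remainder `list(it)` is the current tail `t`; fall-through yields the empty list.
def solGoB (out : List String) : List String → List String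
  | [] => []
  | x :: t =>
    if x = "l" then out
    else if x = "r" then t
    else solGoB (out ++ [x]) t

def solution_alt (str_list : List String) : List String :=
  solGoB [] str_list

-- ===== PRECONDITION & SPEC =====
def Spec_solution (str_list : List String) (out : List String) : Prop := out = solution_alt str_list
instance (str_list : List String) (out : List String) : Decidable (Spec_solution str_list out) := by unfold Spec_solution; infer_instance

-- ===== CLAIM (what is proved, stated in full; the proofs are below) =====
def Claim_equal_solution : Prop := ∀ (str_list : List String), Dom_solution str_list → Spec_solution str_list (solution str_list)

-- ===== LEMMAS AND PROOFS =====

-- A's loop over `rest`, run inside `pre ++ rest` at index `pre.length`,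
-- computes exactly B's loop with accumulator `pre`.
lemma loopA_eq_goB (rest : List String) : ∀ pre : List String,
    solLoopA (pre ++ rest) rest pre.length = solGoB pre rest := by
  induction rest with
  | nil => intro pre; simp [solLoopA, solGoB]
  | cons x t ih =>
    intro pre
    by_cases hxl : x = "l"
    · subst hxl
      simp [solLoopA, solGoB, PySem.List.slice_to_natCast]
    · by_cases hxr : x = "r"
      · subst hxr
        have hc : ((pre.length : Int) + 1) = ((pre.length + 1 : Nat) : Int) := by push_cast; ring
        have hd : (pre ++ "r" :: t).drop (pre.length + 1) = t := by
          simp [List.drop_append (l₁ := pre) (l₂ := "r" :: t) (i := 1)]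
        simp only [solLoopA, solGoB, hxl, if_false, if_pos]
        rw [hc, PySem.List.slice_from_natCast, hd]
      · have hre : pre ++ x :: t = (pre ++ [x]) ++ t := by simp
        have := ih (pre ++ [x])
        simp only [List.length_append, List.length_cons, List.length_nil] at this
        simp only [solLoopA, solGoB, hxl, hxr, if_false, hre]
        simpa using this

-- when neither marker occurs, B's loop falls through to the empty list
lemma goB_no_marker : ∀ (rest out : List String), "l" ∉ rest → "r" ∉ rest →
    solGoB out rest = [] := by
  intro rest
  induction rest with
  | nil => intro out _ _; simp [solGoB]
  | cons x t ih =>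
    intro out hl hr
    have hxl : x ≠ "l" := fun h => hl (by simp [h])
    have hxr : x ≠ "r" := fun h => hr (by simp [h])
    simp only [solGoB, hxl, hxr, if_false]
    exact ih _ (fun h => hl (by simp [h])) (fun h => hr (by simp [h]))

-- ===== VERDICT (by name: the statement is the Claim_ definition above) =====
theorem solution_spec : Claim_equal_solution := by
  intro xs _
  show solution xs = solution_alt xs
  by_cases h : ¬ xs.contains "l" ∧ ¬ xs.contains "r"
  · have hl : "l" ∉ xs := by simpa using h.1
    have hr : "r" ∉ xs := by simpa using h.2
    rw [solution, if_pos h, solution_alt, goB_no_marker xs [] hl hr]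
  · have := loopA_eq_goB xs []
    simp only [List.nil_append, List.length_nil] at this
    rw [solution, if_neg h, solution_alt, this]
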